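-- pv_equiv track=rewrite | github.com/ymtz13/CompetitiveProgramming | AtCoder/ARC140/C.py | solve
-- ===== SOURCE A (Python) =====
-- def f(N, d):
--   if N % 2 == 1:
--     v0 = N // 2 + 1
--   else:
--     if d == +1:
--       v0 = N // 2
--     else:
--       v0 = N // 2 + 1
--
--   ret = [v0]
--   for i in range(N - 1):
--     ret.append(ret[-1] + d)
--     d = -(d + 1) if d > 0 else -(d - 1)
--
--   return ret
--
-- def solve(N, X):
--   P1 = f(N, +1)
--   P2 = f(N, -1)
--
--   if P1[0] == X: return P1
--   if P2[0] == X: return P2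
--
--   P = f(N - 1, +1)
--
--   ret = [X]
--   for p in P:
--     ret.append(p if p < X else p + 1)
--   return ret
-- ===== SOURCE B (Python) =====
-- def _zig(N, d):
--     # closed-form zigzag: v0, v0+d, v0-d, v0+2d, v0-2d, ...
--     if N % 2 == 1 or d != 1:
--         v0 = N // 2 + 1
--     else:
--         v0 = N // 2
--     return [v0] + [v0 + ((i + 1) // 2) * (d if i % 2 == 1 else -d)
--                    for i in range(1, N)]
--
-- def solve(N, X):
--     P1 = _zig(N, 1)
--     P2 = _zig(N, -1)
--     if P1[0] == X:
--         return P1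
--     if P2[0] == X:
--         return P2
--     return [X] + [p + (0 if p < X else 1) for p in _zig(N - 1, 1)]
-- ===== Notes on version B (the rewrite author's own statement) =====
-- stated objective: simpler
-- what changed: f's loop that threads a mutating delta d (append ret[-1]+d; d = -(d+1)/-(d-1)) is replaced by a closed-form per-index formula v0 + ((i+1)//2)*(+-d by parity of i) built with a comprehension, and solve's accumulator loop over P becomes a comprehension.
import Mathlib
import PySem

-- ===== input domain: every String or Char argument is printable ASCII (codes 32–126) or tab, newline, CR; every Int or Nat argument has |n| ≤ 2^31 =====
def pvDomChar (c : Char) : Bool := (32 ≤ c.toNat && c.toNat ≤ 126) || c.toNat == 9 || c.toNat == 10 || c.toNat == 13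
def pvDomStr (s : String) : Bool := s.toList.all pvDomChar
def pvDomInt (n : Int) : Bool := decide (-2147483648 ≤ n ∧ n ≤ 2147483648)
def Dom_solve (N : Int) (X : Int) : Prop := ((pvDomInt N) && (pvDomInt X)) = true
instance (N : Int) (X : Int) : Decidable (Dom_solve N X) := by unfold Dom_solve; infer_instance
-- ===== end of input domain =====

-- B replaces A's delta-threading loop in f by a closed-form per-index formula (objective: simpler).

-- ===== PORT A =====
-- f(N, d): zigzag list built by appending ret[-1]+d and mutating d
def fA (N : Int) (d : Int) : List Int :=
  let v0 : Int :=
    if PySem.Int.mod N 2 == 1 then PySem.Int.floordiv N 2 + 1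
    else if d == 1 then PySem.Int.floordiv N 2
    else PySem.Int.floordiv N 2 + 1
  let st := (PySem.List.pyRange 0 (N - 1) 1).foldl
    (fun (st : List Int × Int) _ =>
      ((st.1 ++ [((PySem.List.pyGet? st.1 (-1)).getD 0) + st.2]),
       if st.2 > 0 then -(st.2 + 1) else -(st.2 - 1)))
    ([v0], d)
  st.1

def solve (N : Int) (X : Int) : List Int :=
  let P1 := fA N 1
  let P2 := fA N (-1)
  if (PySem.List.pyGet? P1 0).getD 0 == X then P1
  else if (PySem.List.pyGet? P2 0).getD 0 == X then P2
  else
    let P := fA (N - 1) 1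
    P.foldl (fun ret p => ret ++ [if p < X then p else p + 1]) [X]

-- ===== PORT B =====
-- _zig(N, d): same v0, elements by closed-form index formula
def fB (N : Int) (d : Int) : List Int :=
  let v0 : Int :=
    if PySem.Int.mod N 2 == 1 || !(d == 1) then PySem.Int.floordiv N 2 + 1
    else PySem.Int.floordiv N 2
  v0 :: (PySem.List.pyRange 1 N 1).map (fun i =>
    v0 + (PySem.Int.floordiv (i + 1) 2) * (if PySem.Int.mod i 2 == 1 then d else -d))

def solve_alt (N : Int) (X : Int) : List Int :=
  let P1 := fB N 1
  let P2 := fB N (-1)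
  if (PySem.List.pyGet? P1 0).getD 0 == X then P1
  else if (PySem.List.pyGet? P2 0).getD 0 == X then P2
  else X :: (fB (N - 1) 1).map (fun p => p + (if p < X then 0 else 1))

-- ===== PRECONDITION & SPEC =====
def Spec_solve (N : Int) (X : Int) (out : List Int) : Prop := out = solve_alt N X
instance (N : Int) (X : Int) (out : List Int) : Decidable (Spec_solve N X out) := by unfold Spec_solve; infer_instance

-- ===== CLAIM (what is proved, stated in full; the proofs are below) =====
def Claim_equal_solve : Prop := ∀ (N : Int) (X : Int), Dom_solve N X → Spec_solve N X (solve N X)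



-- ===== LEMMAS AND PROOFS =====

-- A's loop body (ignores the loop variable)
def zigBody (st : List Int × Int) : List Int × Int :=
  ((st.1 ++ [((PySem.List.pyGet? st.1 (-1)).getD 0) + st.2]),
   if st.2 > 0 then -(st.2 + 1) else -(st.2 - 1))

-- closed form of the element appended at step m, and of the delta after n steps
def zigElem (v0 s : Int) (m : Nat) : Int :=
  v0 + (if m % 2 = 0 then s else -s) * (((m + 2) / 2 : Nat) : Int)

def zigDelta (s : Int) (n : Nat) : Int :=
  (if n % 2 = 0 then s else -s) * ((n : Int) + 1)

theorem foldl_ignore (L : List Int) (init : List Int × Int) :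
    L.foldl (fun (st : List Int × Int) (_ : Int) =>
      ((st.1 ++ [((PySem.List.pyGet? st.1 (-1)).getD 0) + st.2]),
       if st.2 > 0 then -(st.2 + 1) else -(st.2 - 1))) init
      = zigBody^[L.length] init := by
  induction L generalizing init with
  | nil => rfl
  | cons x xs ih =>
      simp only [List.foldl_cons, List.length_cons, Function.iterate_succ_apply]
      exact ih (zigBody init)

theorem iterate_zigBody (v0 s : Int) (hs : s = 1 ∨ s = -1) (n : Nat) :
    zigBody^[n] ([v0], s) =
      (v0 :: (List.range n).map (zigElem v0 s), zigDelta s n) := by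
  induction n with
  | zero =>
      simp [zigDelta]
  | succ n ih =>
      rw [Function.iterate_succ_apply', ih]
      simp only [zigBody, PySem.List.pyGet?_neg_one]
      have hlast : (v0 :: (List.range n).map (zigElem v0 s)).getLast?.getD 0 =
          (if n = 0 then v0 else zigElem v0 s (n - 1)) := by
        cases n with
        | zero => simp
        | succ m =>
            simp only [List.range_succ, List.map_append, List.map_cons, List.map_nil,
              Nat.succ_ne_zero, if_false, Nat.succ_sub_one]
            rw [show v0 :: (List.map (zigElem v0 s) (List.range m) ++ [zigElem v0 s m]) =
                (v0 :: List.map (zigElem v0 s) (List.range m)) ++ [zigElem v0 s m] from rfl,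
              List.getLast?_concat]
            rfl
      have helem : (if n = 0 then v0 else zigElem v0 s (n - 1)) + zigDelta s n =
          zigElem v0 s n := by
        cases n with
        | zero =>
            rcases hs with h | h <;> simp [zigElem, zigDelta, h]
        | succ m =>
            simp only [Nat.succ_ne_zero, if_false, Nat.succ_sub_one, zigElem, zigDelta]
            rcases hs with h | h <;> subst h <;> split_ifs <;> push_cast <;> omega
      have hdelta : (if zigDelta s n > 0 then -(zigDelta s n + 1) else -(zigDelta s n - 1)) =
          zigDelta s (n + 1) := by
        simp only [zigDelta]
        rcases hs with h | h <;> subst h <;> split_ifs <;> push_cast <;> omega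
      rw [hlast, helem, hdelta]
      simp [List.range_succ]

theorem fA_eq_fB (N d : Int) (hd : d = 1 ∨ d = -1) : fA N d = fB N d := by
  have hv0 : (if PySem.Int.mod N 2 == 1 then PySem.Int.floordiv N 2 + 1
      else if d == 1 then PySem.Int.floordiv N 2 else PySem.Int.floordiv N 2 + 1) =
      (if PySem.Int.mod N 2 == 1 || !(d == 1) then PySem.Int.floordiv N 2 + 1
      else PySem.Int.floordiv N 2) := by
    cases h1 : (PySem.Int.mod N 2 == 1) <;> cases h2 : (d == 1) <;> simp_all
  simp only [fA, fB, hv0]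
  rw [foldl_ignore, PySem.List.length_pyRange_one,
    iterate_zigBody _ d hd]
  simp only [PySem.List.pyRange_one]
  rw [List.map_map]
  have hlen : (N - 1 - 0).toNat = (N - 1).toNat := by omega
  rw [hlen]
  congr 1
  apply List.map_congr_left
  intro m _
  simp only [Function.comp, zigElem]
  have h1 : (PySem.Int.mod (1 + (m : Int)) 2 == 1) = (m % 2 == 0) := by
    have he : (1 + (m : Int)) = ((m + 1 : Nat) : Int) := by push_cast; ring
    have hm : PySem.Int.mod ((m + 1 : Nat) : Int) 2 = (((m + 1) % 2 : Nat) : Int) := by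
      exact_mod_cast PySem.Int.mod_natCast (m + 1) 2
    rw [he, hm]
    by_cases hm2 : m % 2 = 0
    · rw [show (m + 1) % 2 = 1 from by omega]; simp [hm2]
    · rw [show (m + 1) % 2 = 0 from by omega]; simp [hm2]
  have h2 : PySem.Int.floordiv (1 + (m : Int) + 1) 2 = (((m + 2) / 2 : Nat) : Int) := by
    have he : (1 + (m : Int) + 1) = ((m + 2 : Nat) : Int) := by push_cast; ring
    rw [he]
    exact_mod_cast PySem.Int.floordiv_natCast (m + 2) 2
  rw [h1, h2]
  by_cases hm2 : m % 2 = 0 <;> simp [hm2, mul_comm]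

theorem foldl_append_map (h : Int → Int) (P : List Int) (acc : List Int) :
    P.foldl (fun ret p => ret ++ [h p]) acc = acc ++ P.map h := by
  induction P generalizing acc with
  | nil => simp
  | cons p ps ih => simp [ih]

theorem solve_eq (N X : Int) : solve N X = solve_alt N X := by
  simp only [solve, solve_alt, fA_eq_fB N 1 (Or.inl rfl), fA_eq_fB N (-1) (Or.inr rfl),
    fA_eq_fB (N - 1) 1 (Or.inl rfl)]
  split_ifs with h1 h2
  · rfl
  · rfl
  · rw [foldl_append_map (fun p => if p < X then p else p + 1)]
    simp only [List.singleton_append, List.cons.injEq, true_and]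
    apply List.map_congr_left
    intro p _
    split_ifs <;> omega

-- ===== VERDICT (by name: the statement is the Claim_ definition above) =====
theorem solve_spec : Claim_equal_solve := by
  intro N X _
  exact solve_eq N X
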